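-- pv_equiv track=rewrite | github.com/abhishek-batchu-cl/RAIA | raia-platform/backend/ml_services/llm_evaluation/llm_evaluator.py | _calculate_performance_breakdown
-- ===== SOURCE A (Python) =====
-- from typing import Dict, Any, List, Optional, Union, Tuple
--
-- def _calculate_performance_breakdown(
--                                    responses: List[Dict[str, Any]],
--                                    overall_metrics: Dict[str, Any]) -> Dict[str, Any]:
--     """Calculate performance breakdown by categories"""
--
--     breakdown = {
--         'by_length': {},
--         'by_complexity': {},
--         'by_category': {}
--     }
--
--     # Group responses by characteristics
--     short_responses = [r for r in responses if len(r.get('output', '').split()) < 50]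
--     medium_responses = [r for r in responses if 50 <= len(r.get('output', '').split()) < 150]
--     long_responses = [r for r in responses if len(r.get('output', '').split()) >= 150]
--
--     breakdown['by_length'] = {
--         'short': len(short_responses),
--         'medium': len(medium_responses),
--         'long': len(long_responses)
--     }
--
--     return breakdown
-- ===== SOURCE B (Python) =====
-- def _calculate_performance_breakdown(responses, overall_metrics):
--     """Single-pass counting of short/medium/long responses."""
--     short = medium = long_ = 0
--     for r in responses:
--         wc = len(r.get('output', '').split())
--         if wc < 50:
--             short += 1
--         elif wc < 150:
--             medium += 1
--         else:
--             long_ += 1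
--     return {
--         'by_length': {'short': short, 'medium': medium, 'long': long_},
--         'by_complexity': {},
--         'by_category': {}
--     }
-- ===== Notes on version B (the rewrite author's own statement) =====
-- stated objective: simpler
-- what changed: replaces three full filter passes (each recomputing the word count) with a single loop maintaining three counters and computing the word count once per response
import Mathlib
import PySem

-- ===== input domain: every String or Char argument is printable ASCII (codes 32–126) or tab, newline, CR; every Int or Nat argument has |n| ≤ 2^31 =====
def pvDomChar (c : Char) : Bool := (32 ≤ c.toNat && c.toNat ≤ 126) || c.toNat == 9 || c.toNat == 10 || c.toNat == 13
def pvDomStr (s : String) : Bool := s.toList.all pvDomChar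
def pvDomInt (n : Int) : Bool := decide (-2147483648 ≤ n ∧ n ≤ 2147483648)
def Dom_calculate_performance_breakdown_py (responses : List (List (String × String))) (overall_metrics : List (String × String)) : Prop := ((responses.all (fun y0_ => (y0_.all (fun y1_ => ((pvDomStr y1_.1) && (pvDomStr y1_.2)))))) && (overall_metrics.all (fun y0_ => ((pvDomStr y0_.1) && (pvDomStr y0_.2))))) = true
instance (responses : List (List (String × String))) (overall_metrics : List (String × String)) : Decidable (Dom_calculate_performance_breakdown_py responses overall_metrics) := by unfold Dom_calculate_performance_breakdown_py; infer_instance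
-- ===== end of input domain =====

-- B replaces A's three filter passes with one fold keeping three counters (single-pass decomposition).


-- word count of r.get('output', '').split()
def pvWc (r : List (String × String)) : Nat :=
  (PySem.Str.split₀ ((PySem.Dict.ofList r).getD "output" "")).length

-- ===== PORT A =====
def calculate_performance_breakdown_py (responses : List (List (String × String))) (overall_metrics : List (String × String)) : List (String × List (String × Int)) :=
  let short_responses := responses.filter (fun r => pvWc r < 50)
  let medium_responses := responses.filter (fun r => decide (50 ≤ pvWc r) && decide (pvWc r < 150))
  let long_responses := responses.filter (fun r => 150 ≤ pvWc r)
  [("by_length", [("short", (short_responses.length : Int)),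
                  ("medium", (medium_responses.length : Int)),
                  ("long", (long_responses.length : Int))]),
   ("by_complexity", []),
   ("by_category", [])]

-- ===== PORT B =====
def calculate_performance_breakdown_py_alt (responses : List (List (String × String))) (overall_metrics : List (String × String)) : List (String × List (String × Int)) :=
  let counts := responses.foldl
    (fun (acc : Int × Int × Int) r =>
      let wc := pvWc r
      if wc < 50 then (acc.1 + 1, acc.2.1, acc.2.2)
      else if wc < 150 then (acc.1, acc.2.1 + 1, acc.2.2)
      else (acc.1, acc.2.1, acc.2.2 + 1))
    (0, 0, 0)
  [("by_length", [("short", counts.1), ("medium", counts.2.1), ("long", counts.2.2)]),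
   ("by_complexity", []),
   ("by_category", [])]

-- ===== PRECONDITION & SPEC =====
def Spec_calculate_performance_breakdown_py (responses : List (List (String × String))) (overall_metrics : List (String × String)) (out : List (String × List (String × Int))) : Prop := out = calculate_performance_breakdown_py_alt responses overall_metrics
instance (responses : List (List (String × String))) (overall_metrics : List (String × String)) (out : List (String × List (String × Int))) : Decidable (Spec_calculate_performance_breakdown_py responses overall_metrics out) := by unfold Spec_calculate_performance_breakdown_py; infer_instance

-- ===== CLAIM (what is proved, stated in full; the proofs are below) =====
def Claim_equal_calculate_performance_breakdown_py : Prop := ∀ (responses : List (List (String × String))) (overall_metrics : List (String × String)), Dom_calculate_performance_breakdown_py responses overall_metrics → Spec_calculate_performance_breakdown_py responses overall_metrics (calculate_performance_breakdown_py responses overall_metrics)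

-- ===== LEMMAS AND PROOFS =====
lemma pv_foldl_counts (rs : List (List (String × String))) (a b c : Int) :
    rs.foldl
      (fun (acc : Int × Int × Int) r =>
        let wc := pvWc r
        if wc < 50 then (acc.1 + 1, acc.2.1, acc.2.2)
        else if wc < 150 then (acc.1, acc.2.1 + 1, acc.2.2)
        else (acc.1, acc.2.1, acc.2.2 + 1))
      (a, b, c)
    = (a + ((rs.filter (fun r => pvWc r < 50)).length : Int),
       b + ((rs.filter (fun r => decide (50 ≤ pvWc r) && decide (pvWc r < 150))).length : Int),
       c + ((rs.filter (fun r => 150 ≤ pvWc r)).length : Int)) := by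
  induction rs generalizing a b c with
  | nil => simp
  | cons r rs ih =>
    simp only [List.foldl_cons, List.filter_cons]
    by_cases h1 : pvWc r < 50 <;> by_cases h2 : pvWc r < 150 <;>
      [skip; (exact absurd (by omega : pvWc r < 150) h2); skip; skip] <;>
      simp only [h1, h2, if_pos, if_neg, not_false_iff, ih] <;>
      simp only [show (50 ≤ pvWc r) = (¬ pvWc r < 50) from by simp [Nat.not_lt],
                 show (150 ≤ pvWc r) = (¬ pvWc r < 150) from by simp [Nat.not_lt],
                 h1, h2] <;>
      simp [h1, h2] <;> omega

-- ===== VERDICT (by name: the statement is the Claim_ definition above) =====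
theorem calculate_performance_breakdown_py_spec : Claim_equal_calculate_performance_breakdown_py := by
  intro responses overall_metrics _
  unfold Spec_calculate_performance_breakdown_py calculate_performance_breakdown_py calculate_performance_breakdown_py_alt
  simp only [pv_foldl_counts]
  norm_num
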